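-- pv_equiv track=rewrite | github.com/jokaah/pp | common.py | normalize_game_name
-- ===== SOURCE A (Python) =====
-- def normalize_game_name(name: str) -> str:
--     if not name:
--         return name
--
--     name = name.strip()
--
--     # Handle ", The", ", A", ", An"
--     for article in ("The", "A", "An"):
--         suffix = f", {article}"
--         if name.endswith(suffix):
--             base = name[: -len(suffix)].strip()
--             return f"{article} {base}"
--
--     return name
-- ===== SOURCE B (Python) =====
-- def normalize_game_name(name: str) -> str:
--     if not name:
--         return name
--     # tokenize the whole name into ", "-separated segments, decide on the last
--     # token, and reassemble by joining (split/join are exact inverses)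
--     parts = name.strip().split(", ")
--     last = parts[-1]
--     if len(parts) > 1 and last in ("The", "A", "An"):
--         return last + " " + ", ".join(parts[:-1]).strip()
--     return ", ".join(parts)
-- ===== Notes on version B (the rewrite author's own statement) =====
-- stated objective: alternative
-- what changed: B tokenizes the stripped name into all comma-space-separated segments with one split, decides on the last token, and reassembles the result with join, instead of A's loop testing three candidate suffixes with endswith and slicing.
import Mathlib
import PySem

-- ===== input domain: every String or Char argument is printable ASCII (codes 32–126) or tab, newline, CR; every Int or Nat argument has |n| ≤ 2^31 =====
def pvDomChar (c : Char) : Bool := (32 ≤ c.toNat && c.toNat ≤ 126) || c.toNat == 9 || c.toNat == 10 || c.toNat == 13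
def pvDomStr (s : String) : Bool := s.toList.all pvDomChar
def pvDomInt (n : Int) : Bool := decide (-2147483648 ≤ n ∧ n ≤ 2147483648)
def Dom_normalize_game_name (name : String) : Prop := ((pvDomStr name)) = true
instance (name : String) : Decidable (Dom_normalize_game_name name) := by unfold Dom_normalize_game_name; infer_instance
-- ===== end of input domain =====

-- B tokenizes the stripped name into all comma-space-separated segments with one split, decides on
-- the last token, and reassembles with join — instead of A's loop testing three candidate
-- suffixes with endswith and slicing (alternative algorithm, same cost).

-- ===== PORT A =====
-- A's `for article in ("The", "A", "An")` loop, as structural recursion over the article list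
def pvArtLoop (s : List Char) : List (List Char) → List Char
  | [] => s
  | art :: rest =>
    let suffix := ',' :: ' ' :: art
    if PySem.Chars.endswith s suffix then
      art ++ ' ' :: PySem.Chars.strip (PySem.List.slice s none (some (-(suffix.length : Int))))
    else pvArtLoop s rest

def normalize_game_name (name : String) : String :=
  if name = "" then name
  else String.ofList (pvArtLoop (PySem.Chars.strip name.toList) [['T', 'h', 'e'], ['A'], ['A', 'n']])

-- ===== PORT B =====
-- hand port of Source B's split on the two-character comma-space separator (Python splits at each
-- leftmost occurrence of the separator, left to right, non-overlapping; exact)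
def pvSplit : List Char → List (List Char)
  | [] => [[]]
  | [c] => [[c]]
  | c :: d :: rest =>
    if c = ',' ∧ d = ' ' then [] :: pvSplit rest
    else
      match pvSplit (d :: rest) with
      | [] => [[c]]
      | p :: ps => (c :: p) :: ps

def normalize_game_name_alt (name : String) : String :=
  if name = "" then name
  else
    let parts := pvSplit (PySem.Chars.strip name.toList)
    let last := parts.getLastD []          -- parts[-1]; pvSplit never returns []
    if 1 < parts.length ∧ (last = ['T', 'h', 'e'] ∨ last = ['A'] ∨ last = ['A', 'n']) then
      String.ofList (last ++ ' ' :: PySem.Chars.strip (PySem.Chars.join [',', ' '] parts.dropLast))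
    else String.ofList (PySem.Chars.join [',', ' '] parts)

-- ===== PRECONDITION & SPEC =====
def Spec_normalize_game_name (name : String) (out : String) : Prop := out = normalize_game_name_alt name
instance (name : String) (out : String) : Decidable (Spec_normalize_game_name name out) := by unfold Spec_normalize_game_name; infer_instance

-- ===== CLAIM (what is proved, stated in full; the proofs are below) =====
def Claim_equal_normalize_game_name : Prop := ∀ (name : String), Dom_normalize_game_name name → Spec_normalize_game_name name (normalize_game_name name)

-- ===== LEMMAS AND PROOFS =====

-- proof-only helper: split at the LAST occurrence of the comma-space separator (none = none);
-- used to characterise both A's suffix loop and B's tokenizer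
def pvRpart : List Char → Option (List Char × List Char)
  | [] => none
  | c :: cs =>
    match pvRpart cs with
    | some (pre, post) => some (c :: pre, post)
    | none =>
      match cs with
      | d :: rest => if c = ',' ∧ d = ' ' then some ([], rest) else none
      | [] => none

lemma pvRpart_none_no_occ (s : List Char) (h : pvRpart s = none) :
    ∀ u v : List Char, s ≠ u ++ ',' :: ' ' :: v := by
  induction s with
  | nil => intro u v hu; exact absurd hu (by simp)
  | cons c cs ih =>
    intro u v hu
    simp only [pvRpart] at h
    rcases hcs : pvRpart cs with _ | ⟨pre, post⟩
    · rw [hcs] at h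
      cases u with
      | nil =>
        simp only [List.nil_append, List.cons.injEq] at hu
        obtain ⟨rfl, rfl⟩ := hu
        simp at h
      | cons d u' =>
        simp only [List.cons_append, List.cons.injEq] at hu
        exact ih hcs u' v hu.2
    · rw [hcs] at h
      simp at h

lemma pvRpart_some_split (s pre post : List Char) (h : pvRpart s = some (pre, post)) :
    s = pre ++ ',' :: ' ' :: post ∧ pvRpart post = none := by
  induction s generalizing pre post with
  | nil => simp [pvRpart] at h
  | cons c cs ih =>
    simp only [pvRpart] at h
    rcases hcs : pvRpart cs with _ | ⟨pre', post'⟩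
    · rw [hcs] at h
      cases cs with
      | nil => simp at h
      | cons d rest =>
        have h' : (if c = ',' ∧ d = ' ' then some ([], rest) else none :
            Option (List Char × List Char)) = some (pre, post) := h
        split_ifs at h' with hcd
        · obtain ⟨rfl, rfl⟩ := hcd
          simp only [Option.some.injEq, Prod.mk.injEq] at h'
          obtain ⟨rfl, rfl⟩ := h'
          refine ⟨rfl, ?_⟩
          simp only [pvRpart] at hcs
          rcases hrest : pvRpart rest with _ | ⟨p, q⟩
          · rfl
          · rw [hrest] at hcs
            simp at hcs
    · rw [hcs] at h
      simp only [Option.some.injEq, Prod.mk.injEq] at h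
      obtain ⟨rfl, rfl⟩ := h
      obtain ⟨h1, h2⟩ := ih pre' post' hcs
      exact ⟨by simp [h1], h2⟩

-- the converse: a decomposition whose tail has no separator IS the rpartition
lemma pvRpart_of_split (pre post : List Char) (h : pvRpart post = none) :
    pvRpart (pre ++ ',' :: ' ' :: post) = some (pre, post) := by
  induction pre with
  | nil =>
    simp only [List.nil_append, pvRpart, h]
    cases post <;> simp
  | cons c pre' ih =>
    simp [pvRpart, ih]

-- a stripped name decomposed by pvRpart ends with ", art" exactly when the tail IS art
lemma endswith_iff_post_eq (pre post art : List Char)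
    (hnone : pvRpart post = none) (hc : ',' ∉ art) :
    (PySem.Chars.endswith (pre ++ ',' :: ' ' :: post) (',' :: ' ' :: art) = true) ↔ post = art := by
  constructor
  · intro h
    rw [PySem.Chars.endswith_iff] at h
    have hpost : (',' :: ' ' :: post) <:+ (pre ++ ',' :: ' ' :: post) := List.suffix_append pre _
    rcases le_total (',' :: ' ' :: art).length (',' :: ' ' :: post).length with hle | hle
    · have hsuf := List.suffix_of_suffix_length_le h hpost hle
      obtain ⟨w, hw⟩ := hsuf
      match w, hw with
      | [], hw => simp only [List.nil_append, List.cons.injEq] at hw; exact hw.2.2.symm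
      | [x], hw => simp [List.cons_append, List.cons.injEq] at hw
      | x :: y :: w', hw =>
        simp only [List.cons_append, List.cons.injEq] at hw
        exact (pvRpart_none_no_occ post hnone w' art hw.2.2.symm).elim
    · have hsuf := List.suffix_of_suffix_length_le hpost h hle
      obtain ⟨w, hw⟩ := hsuf
      match w, hw with
      | [], hw => simp only [List.nil_append, List.cons.injEq] at hw; exact hw.2.2
      | [x], hw => simp [List.cons_append, List.cons.injEq] at hw
      | x :: y :: w', hw =>
        simp only [List.cons_append, List.cons.injEq] at hw
        exact absurd (hw.2.2 ▸ List.mem_append_right w' (by simp)) hc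
  · rintro rfl
    rw [PySem.Chars.endswith_iff]
    exact List.suffix_append pre _

-- A's slice name[:-len(suffix)] recovers exactly the rpartition head
lemma slice_of_split (pre art : List Char) :
    PySem.List.slice (pre ++ ',' :: ' ' :: art) none (some (-((',' :: ' ' :: art).length : Int)))
      = pre := by
  rw [PySem.List.slice_to_neg_natCast (pre ++ ',' :: ' ' :: art) (',' :: ' ' :: art).length
    (by simp)]
  have : (pre ++ ',' :: ' ' :: art).length - (',' :: ' ' :: art).length = pre.length := by simp
  rw [this]
  exact List.take_left' rfl

-- characterisation of A's article loop by pvRpart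
lemma core (s : List Char) :
    pvArtLoop s [['T', 'h', 'e'], ['A'], ['A', 'n']] =
      (match pvRpart s with
       | some (base, article) =>
         if article = ['T', 'h', 'e'] ∨ article = ['A'] ∨ article = ['A', 'n'] then
           article ++ ' ' :: PySem.Chars.strip base
         else s
       | none => s) := by
  rcases hr : pvRpart s with _ | ⟨pre, post⟩
  · have hno := pvRpart_none_no_occ s hr
    have hend : ∀ art : List Char, PySem.Chars.endswith s (',' :: ' ' :: art) = false := by
      intro art
      rw [← Bool.not_eq_true, PySem.Chars.endswith_iff]
      rintro ⟨u, hu⟩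
      exact hno u art hu.symm
    simp [pvArtLoop, hend]
  · obtain ⟨hs, hnone⟩ := pvRpart_some_split s pre post hr
    subst hs
    by_cases h1 : post = ['T', 'h', 'e']
    · subst h1
      simp only [pvArtLoop,
        (endswith_iff_post_eq pre _ ['T', 'h', 'e'] hnone (by decide)).mpr rfl, if_true]
      rw [slice_of_split]
      simp
    · by_cases h2 : post = ['A']
      · subst h2
        simp only [pvArtLoop,
          (endswith_iff_post_eq pre _ ['A'] hnone (by decide)).mpr rfl, if_true]
        have hThe : PySem.Chars.endswith (pre ++ ',' :: ' ' :: ['A']) (',' :: ' ' :: ['T', 'h', 'e']) = false := by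
          rw [← Bool.not_eq_true]
          intro h
          exact absurd ((endswith_iff_post_eq pre _ _ hnone (by decide)).mp h) (by decide)
        rw [hThe]
        simp only [Bool.false_eq_true, if_false]
        rw [slice_of_split]
        simp
      · by_cases h3 : post = ['A', 'n']
        · subst h3
          have hThe : PySem.Chars.endswith (pre ++ ',' :: ' ' :: ['A', 'n']) (',' :: ' ' :: ['T', 'h', 'e']) = false := by
            rw [← Bool.not_eq_true]
            intro h
            exact absurd ((endswith_iff_post_eq pre _ _ hnone (by decide)).mp h) (by decide)
          have hA : PySem.Chars.endswith (pre ++ ',' :: ' ' :: ['A', 'n']) (',' :: ' ' :: ['A']) = false := by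
            rw [← Bool.not_eq_true]
            intro h
            exact absurd ((endswith_iff_post_eq pre _ _ hnone (by decide)).mp h) (by decide)
          simp only [pvArtLoop, hThe, hA,
            (endswith_iff_post_eq pre _ ['A', 'n'] hnone (by decide)).mpr rfl, if_true]
          rw [slice_of_split]
          simp
        · have hend : ∀ art : List Char, ',' ∉ art → post ≠ art →
              PySem.Chars.endswith (pre ++ ',' :: ' ' :: post) (',' :: ' ' :: art) = false := by
            intro art hc hne
            rw [← Bool.not_eq_true]
            intro h
            exact hne ((endswith_iff_post_eq pre post art hnone hc).mp h)
          simp only [pvArtLoop, hend _ (by decide) h1, hend _ (by decide) h2,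
            hend _ (by decide) h3]
          simp [h1, h2, h3]

-- ===== pvSplit facts =====

lemma join_cons_head (sep c : List Char) (p : List Char) (qs : List (List Char)) :
    PySem.Chars.join sep ((c ++ p) :: qs) = c ++ PySem.Chars.join sep (p :: qs) := by
  cases qs with
  | nil => simp [PySem.Chars.join_singleton]
  | cons q qs' => simp [PySem.Chars.join_cons_cons]

lemma join_append_singleton (sep x : List Char) (ps : List (List Char)) (h : ps ≠ []) :
    PySem.Chars.join sep (ps ++ [x]) = PySem.Chars.join sep ps ++ sep ++ x := by
  induction ps with
  | nil => exact absurd rfl h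
  | cons a l ih =>
    cases l with
    | nil => simp [PySem.Chars.join_cons_cons, PySem.Chars.join_singleton]
    | cons b l' =>
      have ih' := ih (by simp)
      simp only [List.cons_append, PySem.Chars.join_cons_cons] at ih' ⊢
      rw [ih']
      simp [List.append_assoc]

-- the one characterisation the proof needs: either the name has no separator and split keeps it
-- whole, or split ends with the rpartition tail and its init rejoins to the rpartition head
lemma pvSplit_char (s : List Char) :
    (pvSplit s = [s] ∧ pvRpart s = none) ∨
    (∃ qs q, pvSplit s = qs ++ [q] ∧ qs ≠ [] ∧
      pvRpart s = some (PySem.Chars.join [',', ' '] qs, q)) := by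
  induction s using pvSplit.induct with
  | case1 => exact Or.inl ⟨rfl, rfl⟩
  | case2 c => exact Or.inl ⟨rfl, by simp [pvRpart]⟩
  | case3 c d rest hcd ih =>
    obtain ⟨rfl, rfl⟩ := hcd
    rcases ih with ⟨hp, hnone⟩ | ⟨qs, q, hq, hqne, hrp⟩
    · refine Or.inr ⟨[[]], rest, ?_, by simp, ?_⟩
      · simp [pvSplit, hp]
      · have := pvRpart_of_split [] rest hnone
        simpa [PySem.Chars.join_singleton] using this
    · obtain ⟨hrest, hqnone⟩ := pvRpart_some_split _ _ _ hrp
      refine Or.inr ⟨[] :: qs, q, ?_, by simp, ?_⟩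
      · simp [pvSplit, hq]
      · rcases qs with _ | ⟨q0, qs'⟩
        · exact absurd rfl hqne
        · rw [PySem.Chars.join_cons_cons, List.nil_append]
          have : (',' : Char) :: ' ' :: rest =
              (',' :: ' ' :: PySem.Chars.join [',', ' '] (q0 :: qs')) ++ ',' :: ' ' :: q := by
            simp [hrest]
          rw [this]
          exact pvRpart_of_split _ _ hqnone
  | case4 c d rest hcd hnil ih =>
    rcases ih with ⟨hp, _⟩ | ⟨qs, q, hq, _, _⟩
    · rw [hp] at hnil; simp at hnil
    · rw [hq] at hnil; simp at hnil
  | case5 c d rest hcd p ps hps ih =>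
    rcases ih with ⟨hp, hnone⟩ | ⟨qs, q, hq, hqne, hrp⟩
    · rw [hps] at hp
      simp only [List.cons.injEq] at hp
      obtain ⟨rfl, rfl⟩ := hp
      refine Or.inl ⟨?_, ?_⟩
      · simp only [pvSplit, if_neg hcd, hps]
      · rw [pvRpart.eq_def]
        simp [hnone, hcd]
    · obtain ⟨hrest, hqnone⟩ := pvRpart_some_split _ _ _ hrp
      rcases qs with _ | ⟨q0, qs'⟩
      · exact absurd rfl hqne
      · rw [hps] at hq
        simp only [List.cons_append, List.cons.injEq] at hq
        obtain ⟨rfl, hps'⟩ := hq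
        refine Or.inr ⟨(c :: p) :: qs', q, ?_, by simp, ?_⟩
        · simp only [pvSplit, if_neg hcd, hps, hps']
          rfl
        · have hjoin : PySem.Chars.join [',', ' '] ((c :: p) :: qs') =
              c :: PySem.Chars.join [',', ' '] (p :: qs') := join_cons_head _ [c] p qs'
          have hs : c :: d :: rest =
              (c :: PySem.Chars.join [',', ' '] (p :: qs')) ++ ',' :: ' ' :: q := by
            simp [hrest]
          rw [hjoin, hs]
          exact pvRpart_of_split _ _ hqnone

-- ===== VERDICT (by name: the statement is the Claim_ definition above) =====
theorem normalize_game_name_spec : Claim_equal_normalize_game_name := by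
  intro name _
  unfold Spec_normalize_game_name normalize_game_name normalize_game_name_alt
  by_cases hn : name = ""
  · simp [hn]
  · simp only [hn, if_false]
    rw [core (PySem.Chars.strip name.toList)]
    set s := PySem.Chars.strip name.toList with hsdef
    rcases pvSplit_char s with ⟨hp, hnone⟩ | ⟨qs, q, hq, hqne, hrp⟩
    · rw [hnone, hp]
      simp [PySem.Chars.join_singleton]
    · obtain ⟨hrest, hqnone⟩ := pvRpart_some_split _ _ _ hrp
      rw [hrp, hq]
      have hlast : (qs ++ [q]).getLastD [] = q := by
        simp [List.getLastD_eq_getLast?]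
      have hdrop : (qs ++ [q]).dropLast = qs := by simp
      rw [hlast, hdrop]
      by_cases hm : q = ['T', 'h', 'e'] ∨ q = ['A'] ∨ q = ['A', 'n']
      · simp [hm, hqne]
      · have hjq : PySem.Chars.join [',', ' '] (qs ++ [q]) = s := by
          rw [join_append_singleton _ _ _ hqne]
          simp [hrest]
        simp [hm, hjq]
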